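-- pv_equiv track=rewrite | github.com/ChrisRG/AOC2021 | aoc2021/day_10.py | complete_lines
-- ===== SOURCE A (Python) =====
-- from typing import List
--
-- def parse_line(line: List[str]) -> tuple[int, List[str]]:
--     # Returns 1 if line is corrupt, 0 if not, along with either the corrupt character or the remaining unclosed characters on the stack
--     stack = []
--     match = {")": "(", "]": "[", "}": "{", ">": "<"}
--     for char in line:
--         match char:
--             case "(" | "[" | "{" | "<":
--                 stack.append(char)
--             case ")" | "]" | "}" | ">":
--                 if match[char] != stack.pop():
--                     return (1, list(char))
--     return (0, stack)
--
-- def complete_lines(data: List[List[str]]) -> List[List[str]]: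
--     closures = []
--     match = {"(": ")", "[": "]", "{": "}", "<": ">"}
--     for line in data:
--         result = parse_line(line)
--         line_closure = []
--         # If result flagged as incomplete, iterate through unclosed chars and append corresponding symbol to closure list
--         if result[0] == 0:
--             for char in result[1]:
--                 line_closure.insert(0, match[char])
--             closures.append(line_closure)
--     return closures
-- ===== SOURCE B (Python) =====
-- def complete_lines(data):
--     # Different algorithm: instead of a one-pass stack scan, normalize each line by
--     # repeatedly deleting the first adjacent matched bracket pair until none remains;
--     # the normal form of a good line is its unclosed openers, whose reversed closers
--     # form the completion. A residue containing any closer marks the line as bad.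
--     pairs = {"(": ")", "[": "]", "{": "}", "<": ">"}
--     closures = []
--     for line in data:
--         word = [c for c in line if c in pairs or c in pairs.values()]
--         changed = True
--         while changed:
--             changed = False
--             for i in range(len(word) - 1):
--                 if pairs.get(word[i]) == word[i + 1]:
--                     del word[i:i + 2]
--                     changed = True
--                     break
--         if all(c in pairs for c in word):
--             closures.append([pairs[c] for c in reversed(word)])
--     return closures
-- ===== Notes on version B (the rewrite author's own statement) =====
-- stated objective: alternative
-- what changed: B replaces A's one-pass stack automaton (parse_line helper returning a corrupt flag plus opener stack, then an insert(0,...) loop) by a rewriting algorithm: it repeatedly deletes the first adjacent matched bracket pair until the line reaches a normal form, appends the reversed closers of an all-opener residue, and skips lines whose residue still contains a closer. (On lines where A raises IndexError — a closer hitting an empty stack — B skips the line; those inputs are outside Pre_.)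
import Mathlib
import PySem

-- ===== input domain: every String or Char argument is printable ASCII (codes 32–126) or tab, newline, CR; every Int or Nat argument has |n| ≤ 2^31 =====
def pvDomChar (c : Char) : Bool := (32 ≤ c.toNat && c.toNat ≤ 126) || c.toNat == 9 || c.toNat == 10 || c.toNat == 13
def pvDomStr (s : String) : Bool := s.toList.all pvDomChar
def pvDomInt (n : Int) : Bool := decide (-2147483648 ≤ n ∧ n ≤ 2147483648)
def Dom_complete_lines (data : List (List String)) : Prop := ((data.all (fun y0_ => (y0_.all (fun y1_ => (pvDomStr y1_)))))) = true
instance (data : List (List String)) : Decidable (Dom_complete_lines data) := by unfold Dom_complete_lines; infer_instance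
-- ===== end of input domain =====

-- B replaces A's one-pass stack scan by a different algorithm: repeated deletion of the
-- first adjacent matched bracket pair down to a normal form (objective: alternative).

-- shared bracket tables (Python dict lookups; exact since only applied to the four bracket strings)
def isOpen (c : String) : Bool := c = "(" || c = "[" || c = "{" || c = "<"
def isClose (c : String) : Bool := c = ")" || c = "]" || c = "}" || c = ">"
def isBracket (c : String) : Bool := isOpen c || isClose c
-- A's parse_line dict {")": "(", "]": "[", "}": "{", ">": "<"}
def openOf (c : String) : String := if c = ")" then "(" else if c = "]" then "[" else if c = "}" then "{" else "<"
-- the dict {"(": ")", "[": "]", "{": "}", "<": ">"}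
def closeOf (c : String) : String := if c = "(" then ")" else if c = "[" then "]" else if c = "{" then "}" else ">"

-- ===== PORT A =====
-- stack kept with its TOP at the head (Python appends/pops at the end; same stack, reversed storage)
def parseLineGo : List String → List String → Int × List String
  | [], stack => (0, stack)
  | c :: rest, stack =>
    if isOpen c then parseLineGo rest (c :: stack)          -- stack.append(char)
    else if isClose c then
      match stack with
      | top :: stack' =>                                     -- stack.pop()
        if openOf c ≠ top then (1, [c]) else parseLineGo rest stack'
      | [] => (0, [c])                                       -- Python raises IndexError here; these inputs are excluded by Pre_
    else parseLineGo rest stack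

def parse_line (line : List String) : Int × List String := parseLineGo line []

def complete_lines (data : List (List String)) : List (List String) :=
  data.foldl (fun closures line =>
    let result := parse_line line
    if result.1 = 0 then
      -- for char in result[1] (bottom-to-top = our list reversed): line_closure.insert(0, match[char])
      closures ++ [result.2.reverse.foldl (fun lc char => closeOf char :: lc) []]
    else closures) []

-- ===== PORT B =====
-- delete the first adjacent matched pair, if any (the inner for/del/break of Source B)
def cancel1 : List String → Option (List String)
  | [] => none
  | [_] => none
  | a :: b :: rest => if isOpen a && closeOf a == b then some rest
                      else (cancel1 (b :: rest)).map (a :: ·)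

-- Source B's 'while changed' loop; each deletion shortens the word by 2, so word.length fuel suffices
def reduceFix : Nat → List String → List String
  | 0, w => w
  | fuel + 1, w => match cancel1 w with
    | none => w
    | some w' => reduceFix fuel w'

def complete_lines_alt (data : List (List String)) : List (List String) :=
  data.foldl (fun closures line =>
    let word := line.filter isBracket
    let res := reduceFix word.length word
    if res.all isOpen then closures ++ [res.reverse.map closeOf] else closures) []

-- ===== PRECONDITION & SPEC =====
-- true exactly when the Python scan's stack.pop() hits an empty list (IndexError): a closing
-- bracket preceded by a fully matched bracket sequence, before any mismatch stops the line
def pyRaisesLine : List String → List String → Bool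
  | [], _ => false
  | c :: rest, stack =>
    if isOpen c then pyRaisesLine rest (c :: stack)
    else if isClose c then
      match stack with
      | [] => true
      | top :: stack' => if openOf c ≠ top then false else pyRaisesLine rest stack'
    else pyRaisesLine rest stack

-- Pre_ excludes exactly the lines on which A raises IndexError (a closing bracket preceded by a
-- fully matched bracket sequence); on every line where A returns — complete, incomplete or
-- mismatch-corrupt — the input is admitted.
def Pre_complete_lines (data : List (List String)) : Prop :=
  ∀ line ∈ data, pyRaisesLine line [] = false
instance (data : List (List String)) : Decidable (Pre_complete_lines data) := by unfold Pre_complete_lines; infer_instance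
def pvWitness_complete_lines : List (List String) := [["(", "[", "]"], ["<"], ["(", "]", ")"]]

def Spec_complete_lines (data : List (List String)) (out : List (List String)) : Prop := out = complete_lines_alt data
instance (data : List (List String)) (out : List (List String)) : Decidable (Spec_complete_lines data out) := by unfold Spec_complete_lines; infer_instance

-- ===== CLAIM (what is proved, stated in full; the proofs are below) =====
def Claim_equal_complete_lines : Prop := ∀ (data : List (List String)), Dom_complete_lines data → Pre_complete_lines data → Spec_complete_lines data (complete_lines data)

-- ===== LEMMAS AND PROOFS =====

lemma closeOf_facts {o : String} (h : isOpen o = true) :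
    isOpen (closeOf o) = false ∧ isClose (closeOf o) = true ∧ openOf (closeOf o) = o := by
  simp [isOpen] at h
  rcases h with ((h | h) | h) | h <;> subst h <;> decide

lemma open_close_iff {o c : String} (ho : isOpen o = true) (hc : isClose c = true) :
    (openOf c = o ↔ closeOf o = c) := by
  simp [isOpen] at ho; simp [isClose] at hc
  rcases ho with ((ho | ho) | ho) | ho <;> subst ho <;>
    rcases hc with ((hc | hc) | hc) | hc <;> subst hc <;> decide

lemma foldl_cons_eq_reverse_map (f : String → String) :
    ∀ (l acc : List String), l.foldl (fun a c => f c :: a) acc = (l.map f).reverse ++ acc := by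
  intro l
  induction l with
  | nil => intro acc; simp
  | cons x xs ih => intro acc; simp [List.foldl_cons, ih]

-- non-bracket characters are ignored by A's scan
lemma parse_filter : ∀ (line stack : List String),
    parseLineGo line stack = parseLineGo (line.filter isBracket) stack := by
  intro line
  induction line with
  | nil => intro stack; rfl
  | cons c rest ih =>
    intro stack
    by_cases ho : isOpen c = true
    · simp [parseLineGo, isBracket, ho, ih]
    · by_cases hc : isClose c = true
      · cases stack with
        | nil => simp [parseLineGo, isBracket, ho, hc]
        | cons t s' => by_cases hm : openOf c = t <;>
            simp [parseLineGo, isBracket, ho, hc, hm, ih]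
      · simp [parseLineGo, isBracket, ho, hc, ih]

-- and by the raise detector
lemma raises_filter : ∀ (line stack : List String),
    pyRaisesLine line stack = pyRaisesLine (line.filter isBracket) stack := by
  intro line
  induction line with
  | nil => intro stack; rfl
  | cons c rest ih =>
    intro stack
    by_cases ho : isOpen c = true
    · simp [pyRaisesLine, isBracket, ho, ih]
    · by_cases hc : isClose c = true
      · cases stack with
        | nil => simp [pyRaisesLine, isBracket, ho, hc]
        | cons t s' => by_cases hm : openOf c = t <;>
            simp [pyRaisesLine, isBracket, ho, hc, hm, ih]
      · simp [pyRaisesLine, isBracket, ho, hc, ih]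


-- one-step unfoldings (to control recursion in proofs)
lemma parseLineGo_cons (c : String) (rest stack : List String) :
    parseLineGo (c :: rest) stack =
      (if isOpen c then parseLineGo rest (c :: stack)
       else if isClose c then
         match stack with
         | top :: stack' => if openOf c ≠ top then (1, [c]) else parseLineGo rest stack'
         | [] => (0, [c])
       else parseLineGo rest stack) := rfl

lemma pyRaisesLine_cons (c : String) (rest stack : List String) :
    pyRaisesLine (c :: rest) stack =
      (if isOpen c then pyRaisesLine rest (c :: stack)
       else if isClose c then
         match stack with
         | [] => true
         | top :: stack' => if openOf c ≠ top then false else pyRaisesLine rest stack'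
       else pyRaisesLine rest stack) := rfl

-- deleting an adjacent matched pair does not change A's scan …
lemma parse_cancel : ∀ (u u' : List String), cancel1 u = some u' →
    ∀ stack, parseLineGo u stack = parseLineGo u' stack := by
  intro u
  induction u with
  | nil => intro u' h; simp [cancel1] at h
  | cons a rest ih =>
    intro u' h stack
    cases rest with
    | nil => simp [cancel1] at h
    | cons b v =>
      by_cases hp : (isOpen a && closeOf a == b) = true
      · simp [cancel1, hp] at h
        subst h
        obtain ⟨ha', hb'⟩ := Bool.and_eq_true_iff.mp hp
        have ha : isOpen a = true := ha'
        have hb : closeOf a = b := by simpa using hb'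
        obtain ⟨h1, h2, h3⟩ := closeOf_facts ha
        subst hb
        simp [parseLineGo, ha, h1, h2, h3]
      · simp [cancel1, hp] at h
        obtain ⟨w, hw, rfl⟩ := h
        rw [parseLineGo_cons a (b :: v) stack, parseLineGo_cons a w stack]
        by_cases ho : isOpen a = true
        · simp only [ho, if_true]
          exact ih _ hw _
        · by_cases hc : isClose a = true
          · cases stack with
            | nil => simp [ho, hc]
            | cons t s' =>
              by_cases hm : openOf a = t
              · simp only [ho, hc, hm, ne_eq, not_true_eq_false, if_false,
                  Bool.false_eq_true, if_true]
                exact ih _ hw _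
              · simp [ho, hc, hm]
          · simp only [ho, hc, Bool.false_eq_true, if_false]
            exact ih _ hw _

-- … nor whether the scan raises
lemma raises_cancel : ∀ (u u' : List String), cancel1 u = some u' →
    ∀ stack, pyRaisesLine u stack = pyRaisesLine u' stack := by
  intro u
  induction u with
  | nil => intro u' h; simp [cancel1] at h
  | cons a rest ih =>
    intro u' h stack
    cases rest with
    | nil => simp [cancel1] at h
    | cons b v =>
      by_cases hp : (isOpen a && closeOf a == b) = true
      · simp [cancel1, hp] at h
        subst h
        obtain ⟨ha', hb'⟩ := Bool.and_eq_true_iff.mp hp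
        have ha : isOpen a = true := ha'
        have hb : closeOf a = b := by simpa using hb'
        obtain ⟨h1, h2, h3⟩ := closeOf_facts ha
        subst hb
        simp [pyRaisesLine, ha, h1, h2, h3]
      · simp [cancel1, hp] at h
        obtain ⟨w, hw, rfl⟩ := h
        rw [pyRaisesLine_cons a (b :: v) stack, pyRaisesLine_cons a w stack]
        by_cases ho : isOpen a = true
        · simp only [ho, if_true]
          exact ih _ hw _
        · by_cases hc : isClose a = true
          · cases stack with
            | nil => simp [ho, hc]
            | cons t s' =>
              by_cases hm : openOf a = t
              · simp only [ho, hc, hm, ne_eq, not_true_eq_false, if_false,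
                  Bool.false_eq_true, if_true]
                exact ih _ hw _
              · simp [ho, hc, hm]
          · simp only [ho, hc, Bool.false_eq_true, if_false]
            exact ih _ hw _

lemma cancel1_length : ∀ (u u' : List String), cancel1 u = some u' → u'.length + 2 = u.length := by
  intro u
  induction u with
  | nil => intro u' h; simp [cancel1] at h
  | cons a rest ih =>
    intro u' h
    cases rest with
    | nil => simp [cancel1] at h
    | cons b v =>
      by_cases hp : (isOpen a && closeOf a == b) = true
      · simp [cancel1, hp] at h; subst h; simp
      · simp [cancel1, hp] at h
        obtain ⟨w, hw, rfl⟩ := h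
        have := ih _ hw
        simp at this ⊢
        omega

lemma cancel1_all (P : String → Bool) : ∀ (u u' : List String), cancel1 u = some u' →
    u.all P = true → u'.all P = true := by
  intro u
  induction u with
  | nil => intro u' h; simp [cancel1] at h
  | cons a rest ih =>
    intro u' h hall
    cases rest with
    | nil => simp [cancel1] at h
    | cons b v =>
      simp only [List.all_cons, Bool.and_eq_true] at hall
      by_cases hp : (isOpen a && closeOf a == b) = true
      · simp [cancel1, hp] at h; subst h
        exact hall.2.2
      · simp [cancel1, hp] at h
        obtain ⟨w, hw, rfl⟩ := h
        have hw' : w.all P = true := ih _ hw (by simp [hall.2.1, hall.2.2])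
        simp [hall.1, hw']

-- with fuel ≥ length the fixpoint is reached: the result admits no further deletion
lemma reduce_irred : ∀ (fuel : Nat) (w : List String), w.length ≤ fuel →
    cancel1 (reduceFix fuel w) = none := by
  intro fuel
  induction fuel with
  | zero =>
    intro w h
    have : w = [] := List.length_eq_zero_iff.mp (Nat.le_zero.mp h)
    subst this; rfl
  | succ n ih =>
    intro w h
    cases hc : cancel1 w with
    | none => simpa [reduceFix, hc] using hc
    | some w' =>
      have hl := cancel1_length _ _ hc
      simpa [reduceFix, hc] using ih w' (by omega)

lemma reduce_parse : ∀ (fuel : Nat) (w stack : List String),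
    parseLineGo w stack = parseLineGo (reduceFix fuel w) stack := by
  intro fuel
  induction fuel with
  | zero => intro w stack; rfl
  | succ n ih =>
    intro w stack
    cases hc : cancel1 w with
    | none => simp [reduceFix, hc]
    | some w' => rw [reduceFix, hc, parse_cancel _ _ hc, ih]

lemma reduce_raises : ∀ (fuel : Nat) (w stack : List String),
    pyRaisesLine w stack = pyRaisesLine (reduceFix fuel w) stack := by
  intro fuel
  induction fuel with
  | zero => intro w stack; rfl
  | succ n ih =>
    intro w stack
    cases hc : cancel1 w with
    | none => simp [reduceFix, hc]
    | some w' => rw [reduceFix, hc, raises_cancel _ _ hc, ih]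

lemma reduce_all (P : String → Bool) : ∀ (fuel : Nat) (w : List String),
    w.all P = true → (reduceFix fuel w).all P = true := by
  intro fuel
  induction fuel with
  | zero => intro w h; exact h
  | succ n ih =>
    intro w h
    cases hc : cancel1 w with
    | none => simpa [reduceFix, hc] using h
    | some w' => simpa [reduceFix, hc] using ih w' (cancel1_all P _ _ hc h)

-- a word of openers is pushed wholesale
lemma scan_open_prefix : ∀ (p : List String), p.all isOpen = true →
    ∀ (v stack : List String), parseLineGo (p ++ v) stack = parseLineGo v (p.reverse ++ stack) := by
  intro p
  induction p with
  | nil => intro _ v stack; simp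
  | cons a q ih =>
    intro h v stack
    simp only [List.all_cons, Bool.and_eq_true] at h
    rw [List.cons_append, parseLineGo_cons]
    simp only [h.1, if_true]
    rw [ih h.2 v (a :: stack)]
    simp

-- an adjacent matched pair always admits a deletion
lemma pair_reducible : ∀ (a : List String) (x y : String) (b : List String),
    isOpen x = true → closeOf x = y → cancel1 (a ++ x :: y :: b) ≠ none := by
  intro a
  induction a with
  | nil =>
    intro x y b hx hy
    simp [cancel1, hx, hy]
  | cons e a' ih =>
    intro x y b hx hy
    have hne : a' ++ x :: y :: b ≠ [] := by simp
    obtain ⟨h1, t1, ht⟩ := List.exists_cons_of_ne_nil hne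
    have hrec : cancel1 (h1 :: t1) ≠ none := by rw [← ht]; exact ih x y b hx hy
    simp only [List.cons_append, ht]
    by_cases hp : (isOpen e && closeOf e == h1) = true
    · simp [cancel1, hp]
    · intro hcontra
      apply hrec
      have hmap : cancel1 (e :: h1 :: t1) = (cancel1 (h1 :: t1)).map (e :: ·) := by
        simp [cancel1, hp]
      rw [hmap] at hcontra
      simpa using hcontra

-- on a fully reduced all-bracket word the scan from the empty stack is immediate:
-- all openers → incomplete with the word as stack; otherwise corrupt (or, excluded, a raise)
lemma scan_all_open (p : List String) (hp : p.all isOpen = true) (stack : List String) :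
    parseLineGo p stack = (0, p.reverse ++ stack) := by
  have := scan_open_prefix p hp [] stack
  simpa [parseLineGo] using this

lemma scan_irred_bad (u : List String) (hirr : cancel1 u = none)
    (hbr : u.all isBracket = true) (hno : ¬ u.all isOpen = true)
    (hnr : pyRaisesLine u [] = false) : (parseLineGo u []).1 = 1 := by
  have hsplit := List.takeWhile_append_dropWhile (p := isOpen) (l := u)
  have hpall : (u.takeWhile isOpen).all isOpen = true := by
    simp only [List.all_eq_true]
    intro x hx
    exact List.mem_takeWhile_imp hx
  cases hd : u.dropWhile isOpen with
  | nil =>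
    exfalso
    apply hno
    rw [← hsplit, hd]
    simpa using hpall
  | cons a v =>
    have hna : isOpen a = false := by
      have := List.head_dropWhile_not (p := isOpen) (l := u) (by simp [hd])
      simpa [hd] using this
    have hca : isClose a = true := by
      have hmem : a ∈ u := by rw [← hsplit, hd]; simp
      have := (List.all_eq_true.mp hbr) a hmem
      simpa [isBracket, hna] using this
    rcases List.eq_nil_or_concat (u.takeWhile isOpen) with hp | ⟨q, o, hqo⟩
    · exfalso
      have hu : u = a :: v := by rw [← hsplit, hd, hp]; simp
      rw [hu] at hnr
      simp [pyRaisesLine, hna, hca] at hnr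
    · have ho : isOpen o = true := by
        have : o ∈ u.takeWhile isOpen := by rw [hqo]; simp
        exact (List.all_eq_true.mp hpall) o this
      have hmm : closeOf o ≠ a := by
        intro hc
        have hu : q ++ o :: a :: v = u := by
          conv_rhs => rw [← hsplit, hd, hqo]
          simp
        exact pair_reducible q o a v ho hc (by rw [hu]; exact hirr)
      have hmm' : openOf a ≠ o := fun h => hmm ((open_close_iff ho hca).mp h)
      have hstep : parseLineGo u [] = parseLineGo (a :: v) ((u.takeWhile isOpen).reverse ++ []) := by
        conv_lhs => rw [← hsplit, hd]
        exact scan_open_prefix _ hpall (a :: v) []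
      rw [hstep, hqo]
      simp [parseLineGo_cons, hna, hca, hmm']

-- one line of the fold: A's step equals B's step when the line cannot raise
lemma line_step (line : List String) (hnr : pyRaisesLine line [] = false)
    (closures : List (List String)) :
    (let result := parse_line line
     if result.1 = 0 then
       closures ++ [result.2.reverse.foldl (fun lc char => closeOf char :: lc) []]
     else closures)
    = (let word := line.filter isBracket
       let res := reduceFix word.length word
       if res.all isOpen then closures ++ [res.reverse.map closeOf] else closures) := by
  show (if (parse_line line).1 = 0 then
          closures ++ [(parse_line line).2.reverse.foldl (fun lc char => closeOf char :: lc) []]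
        else closures)
      = (if (reduceFix (line.filter isBracket).length (line.filter isBracket)).all isOpen
         then closures ++ [(reduceFix (line.filter isBracket).length (line.filter isBracket)).reverse.map closeOf]
         else closures)
  have hscan : parse_line line
      = parseLineGo (reduceFix (line.filter isBracket).length (line.filter isBracket)) [] := by
    rw [parse_line, parse_filter, reduce_parse]
  have hbr : (reduceFix (line.filter isBracket).length (line.filter isBracket)).all isBracket = true := by
    refine reduce_all isBracket _ _ ?_
    simp only [List.all_eq_true]
    intro x hx
    exact (List.mem_filter.mp hx).2
  have hirr : cancel1 (reduceFix (line.filter isBracket).length (line.filter isBracket)) = none :=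
    reduce_irred _ _ le_rfl
  have hnr' : pyRaisesLine (reduceFix (line.filter isBracket).length (line.filter isBracket)) [] = false := by
    rw [← reduce_raises, ← raises_filter]
    exact hnr
  generalize hres : reduceFix (line.filter isBracket).length (line.filter isBracket) = res
    at hscan hbr hirr hnr' ⊢
  by_cases hall : res.all isOpen = true
  · rw [hscan, scan_all_open res hall [], if_pos rfl, if_pos hall]
    simp [foldl_cons_eq_reverse_map]
  · have h1 := scan_irred_bad res hirr hbr hall hnr'
    rw [hscan, if_neg (by rw [h1]; decide), if_neg hall]

lemma fold_eq : ∀ (data : List (List String)) (closures : List (List String)),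
    (∀ line ∈ data, pyRaisesLine line [] = false) →
    data.foldl (fun closures line =>
        let result := parse_line line
        if result.1 = 0 then
          closures ++ [result.2.reverse.foldl (fun lc char => closeOf char :: lc) []]
        else closures) closures
    = data.foldl (fun closures line =>
        let word := line.filter isBracket
        let res := reduceFix word.length word
        if res.all isOpen then closures ++ [res.reverse.map closeOf] else closures) closures := by
  intro data
  induction data with
  | nil => intro closures _; rfl
  | cons l ls ih =>
    intro closures h
    simp only [List.foldl_cons]
    rw [line_step l (h l (by simp)) closures]
    exact ih _ (fun line hl => h line (by simp [hl]))

-- ===== VERDICT (by name: the statement is the Claim_ definition above) =====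
theorem complete_lines_spec : Claim_equal_complete_lines := by
  intro data _ hpre
  unfold Spec_complete_lines complete_lines complete_lines_alt
  exact fold_eq data [] hpre
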